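-- pv_equiv track=rewrite | github.com/pennysilv/project | calc_func.py | calculate_lines
-- ===== SOURCE A (Python) =====
-- def calculate_lines(data: str) -> int:
--     line_count = 0
--     empty_line = True
--     for ch in data:
--         if ch == '\n' and empty_line:
--             pass
--         elif ch == '\n' and not empty_line:
--             empty_line = True
--             line_count += 1
--         else:
--             empty_line = False
--     if not empty_line:
--         line_count += 1
--     return line_count
-- ===== SOURCE B (Python) =====
-- def calculate_lines(data: str) -> int:
--     return sum(1 for line in data.split('\n') if line)
-- ===== Notes on version B (the rewrite author's own statement) =====
-- stated objective: simpler
-- what changed: Replaces the character-by-character state machine with an empty_line flag by one split on the newline separator followed by a count of the non-empty segments.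
import Mathlib
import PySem

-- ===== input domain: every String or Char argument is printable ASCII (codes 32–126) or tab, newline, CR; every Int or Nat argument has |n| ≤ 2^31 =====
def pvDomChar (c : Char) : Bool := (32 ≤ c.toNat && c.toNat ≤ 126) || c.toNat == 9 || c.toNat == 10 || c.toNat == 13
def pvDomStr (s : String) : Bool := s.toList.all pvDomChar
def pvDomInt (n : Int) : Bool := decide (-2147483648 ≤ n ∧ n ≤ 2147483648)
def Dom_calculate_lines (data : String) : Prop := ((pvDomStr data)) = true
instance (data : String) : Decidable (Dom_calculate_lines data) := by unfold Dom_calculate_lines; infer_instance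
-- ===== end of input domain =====

-- B replaces A's per-character state machine by one split on '\n' plus a count of non-empty segments (simpler).

-- ===== PORT A =====
-- literal port of A's loop: state (line_count, empty_line), one step per character
def calcStepA (st : Int × Bool) (ch : Char) : Int × Bool :=
  if ch = '\n' ∧ st.2 then st
  else if ch = '\n' ∧ ¬ st.2 then (st.1 + 1, true)
  else (st.1, false)

def calculate_lines (data : String) : Int :=
  let st := data.toList.foldl calcStepA (0, true)
  if ¬ st.2 then st.1 + 1 else st.1

-- ===== PORT B =====
def calculate_lines_alt (data : String) : Int :=
  match PySem.Str.split? data "\n" with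
  | some parts => parts.foldl (fun acc line => if line ≠ "" then acc + 1 else acc) 0
  | none => 0   -- unreachable: the separator "\n" is non-empty

-- ===== PRECONDITION & SPEC =====
def Spec_calculate_lines (data : String) (out : Int) : Prop := out = calculate_lines_alt data
instance (data : String) (out : Int) : Decidable (Spec_calculate_lines data out) := by unfold Spec_calculate_lines; infer_instance

-- ===== CLAIM (what is proved, stated in full; the proofs are below) =====
def Claim_equal_calculate_lines : Prop := ∀ (data : String), Dom_calculate_lines data → Spec_calculate_lines data (calculate_lines data)

-- ===== LEMMAS AND PROOFS =====

-- reference splitter: split a char list on '\n', cur = segment built so far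
def splitNl (cur : List Char) : List Char → List (List Char)
  | [] => [cur]
  | c :: r => if c = '\n' then cur :: splitNl [] r else splitNl (cur ++ [c]) r

theorem go_nl (fuel : Nat) : ∀ (l cur : List Char) (acc : List (List Char)), l.length ≤ fuel →
    PySem.Chars.splitOn.go ['\n'] fuel l cur acc = acc.reverse ++ splitNl cur.reverse l := by
  induction fuel with
  | zero =>
    intro l cur acc h
    have : l = [] := by cases l <;> simp_all
    subst this
    rw [PySem.Chars.splitOn.go.eq_1]
    simp [splitNl]
  | succ n ih =>
    intro l cur acc h
    cases l with
    | nil =>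
      rw [PySem.Chars.splitOn.go.eq_2 _ _ _ _ (by omega)]
      simp [splitNl]
    | cons c r =>
      rw [PySem.Chars.splitOn.go.eq_3]
      by_cases hc : c = '\n'
      · subst hc
        rw [if_pos (by simp [List.isPrefixOf])]
        simp only [List.length_singleton, List.drop_one, List.tail_cons]
        rw [ih r [] (cur.reverse :: acc) (by simp at h; omega)]
        simp [splitNl]
      · rw [if_neg (by simp [List.isPrefixOf]; intro h'; exact absurd h'.symm hc)]
        rw [ih r (c :: cur) acc (by simp at h; omega)]
        simp [splitNl, hc]

theorem splitOn_nl (l : List Char) : PySem.Chars.splitOn l ['\n'] = splitNl [] l := by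
  unfold PySem.Chars.splitOn
  rw [go_nl (l.length + 1) l [] [] (by omega)]
  simp

-- A's loop and a count over the reference split agree
theorem mainA (l : List Char) : ∀ (count : Int) (cur : List Char),
    (let s := l.foldl calcStepA (count, cur.isEmpty);
     if ¬ s.2 then s.1 + 1 else s.1)
    = (splitNl cur l).foldl (fun a p => if p ≠ [] then a + 1 else a) count := by
  induction l with
  | nil =>
    intro count cur
    cases cur <;> simp [splitNl]
  | cons c r ih =>
    intro count cur
    by_cases hc : c = '\n'
    · subst hc
      cases cur with
      | nil =>
        simp only [List.foldl_cons, splitNl]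
        have : calcStepA (count, (List.nil (α := Char)).isEmpty) '\n' = (count, (List.nil (α := Char)).isEmpty) := by
          simp [calcStepA]
        rw [this]
        rw [ih count []]
        simp
      | cons d ds =>
        simp only [List.foldl_cons, splitNl]
        have : calcStepA (count, (d :: ds).isEmpty) '\n' = (count + 1, (List.nil (α := Char)).isEmpty) := by
          simp [calcStepA]
        rw [this]
        rw [ih (count + 1) []]
        simp
    · simp only [List.foldl_cons, splitNl]
      have : calcStepA (count, cur.isEmpty) c = (count, (cur ++ [c]).isEmpty) := by
        simp [calcStepA, hc]
      rw [this]
      rw [ih count (cur ++ [c])]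
      simp [hc]

-- ===== VERDICT (by name: the statement is the Claim_ definition above) =====
theorem calculate_lines_spec : Claim_equal_calculate_lines := by
  intro data _
  unfold Spec_calculate_lines calculate_lines calculate_lines_alt
  rw [PySem.Str.split?]
  rw [show PySem.Chars.split? data.toList "\n".toList
        = some (PySem.Chars.splitOn data.toList ['\n']) from by
      simp [PySem.Chars.split?]]
  simp only [Option.map_some]
  rw [splitOn_nl]
  rw [List.foldl_map]
  have := mainA data.toList 0 []
  simp only [List.isEmpty_nil] at this
  rw [this]
  congr 1
  funext a p
  simp
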